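-- pv_equiv track=rewrite | github.com/aviraljain99/LeetCoding | CountingBits.py | countBitsOptimized
-- ===== SOURCE A (Python) =====
-- from typing import List
--
-- def countBitsOptimized(n: int) -> List[int]:
--     result = [0]
--
--     # Creating an array to store locations where there are powers of 2
--     locations = []
--     powerOfTwo = 1
--     for i in range(n + 1):
--         if i == powerOfTwo:
--             locations.append(1)
--             powerOfTwo *= 2
--         else:
--             locations.append(0)
--         i += 1
--
--     lookBack = 1
--     for i in range(1, n + 1):
--         if locations[i] == 1:
--             lookBack *= 2
--             result.append(1)
--         else:
--             result.append(result[i - lookBack] + 1)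
--
--     return result
-- ===== SOURCE B (Python) =====
-- from typing import List
--
-- def countBitsOptimized(n: int) -> List[int]:
--     result = [0]
--     for i in range(1, n + 1):
--         result.append(result[i // 2] + i % 2)
--     return result
-- ===== Notes on version B (the rewrite author's own statement) =====
-- stated objective: simpler
-- what changed: Replaces A's two-pass DP (a precomputed power-of-two locations array plus a lookBack state that subtracts the highest power of two, relying on negative-index wraparound) with a single loop using the halving recurrence result[i // 2] + i % 2: no locations array, no lookBack state, a different subproblem index.
import Mathlib
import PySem

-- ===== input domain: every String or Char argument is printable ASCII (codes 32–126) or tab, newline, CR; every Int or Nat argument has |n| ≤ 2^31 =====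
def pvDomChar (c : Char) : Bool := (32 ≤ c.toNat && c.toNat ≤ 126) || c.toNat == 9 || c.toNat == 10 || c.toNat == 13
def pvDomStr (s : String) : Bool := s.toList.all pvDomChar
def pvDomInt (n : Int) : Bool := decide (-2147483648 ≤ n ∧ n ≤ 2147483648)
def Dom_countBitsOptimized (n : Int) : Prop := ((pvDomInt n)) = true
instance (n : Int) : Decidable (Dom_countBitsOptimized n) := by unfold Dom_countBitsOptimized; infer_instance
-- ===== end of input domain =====

-- B replaces A's two-pass DP (locations array + lookBack state with negative-index wraparound)
-- by a single loop with the halving recurrence result[i // 2] + i % 2 (simpler).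

-- ===== PORT A =====
-- literal port of A: first loop builds (locations, powerOfTwo), second builds (result, lookBack).
-- All list indexings A performs are in range (result[i - lookBack] via Python's negative-index
-- wraparound), so pyGetD's default 0 is never used; this is proved by the lemmas below.
def countBitsOptimized (n : Int) : List Int :=
  let s1 :=
    (PySem.List.pyRange 0 (n + 1) 1).foldl
      (fun (st : List Int × Int) i =>
        if i = st.2 then (st.1 ++ [1], st.2 * 2) else (st.1 ++ [0], st.2))
      ([], 1)
  let locations := s1.1
  let s2 :=
    (PySem.List.pyRange 1 (n + 1) 1).foldl
      (fun (st : List Int × Int) i =>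
        if PySem.List.pyGetD locations i 0 = 1 then
          (st.1 ++ [1], st.2 * 2)
        else
          (st.1 ++ [PySem.List.pyGetD st.1 (i - st.2) 0 + 1], st.2))
      ([0], 1)
  s2.1

-- ===== PORT B =====
def countBitsOptimized_alt (n : Int) : List Int :=
  (PySem.List.pyRange 1 (n + 1) 1).foldl
    (fun r i =>
      r ++ [PySem.List.pyGetD r (PySem.Int.floordiv i 2) 0 + PySem.Int.mod i 2])
    [0]

-- ===== PRECONDITION & SPEC =====
def Spec_countBitsOptimized (n : Int) (out : List Int) : Prop := out = countBitsOptimized_alt n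
instance (n : Int) (out : List Int) : Decidable (Spec_countBitsOptimized n out) := by unfold Spec_countBitsOptimized; infer_instance

-- ===== CLAIM (what is proved, stated in full; the proofs are below) =====
def Claim_equal_countBitsOptimized : Prop := ∀ (n : Int), Dom_countBitsOptimized n → Spec_countBitsOptimized n (countBitsOptimized n)

-- ===== LEMMAS AND PROOFS =====

-- popcount by halving: pc m = pc (m / 2) + m % 2
def pc (m : Nat) : Int :=
  if h : m = 0 then 0 else pc (m / 2) + ((m % 2 : Nat) : Int)
decreasing_by exact Nat.div_lt_self (Nat.pos_of_ne_zero h) one_lt_two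

lemma pc_zero : pc 0 = 0 := by simp [pc]

lemma pc_succ {m : Nat} (h : m ≠ 0) : pc m = pc (m / 2) + ((m % 2 : Nat) : Int) := by
  rw [pc]; simp [h]

lemma pc_two_mul (m : Nat) : pc (2 * m) = pc m := by
  rcases Nat.eq_zero_or_pos m with rfl | hm
  · simp
  · rw [pc_succ (by omega)]
    have h2 : 2 * m / 2 = m := by omega
    have h3 : 2 * m % 2 = 0 := by omega
    simp [h2, h3]

lemma pc_pow (k : Nat) : pc (2 ^ k) = 1 := by
  induction k with
  | zero => rw [pow_zero, pc_succ one_ne_zero]; simp [pc_zero]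
  | succ k ih => rw [pow_succ, mul_comm, pc_two_mul]; exact ih

lemma pc_add_pow (k : Nat) : ∀ r, r < 2 ^ k → pc (2 ^ k + r) = pc r + 1 := by
  induction k with
  | zero =>
    intro r hr
    interval_cases r
    show pc (2 ^ 0 + 0) = pc 0 + 1
    norm_num [pc_succ one_ne_zero, pc_zero]
  | succ k ih =>
    intro r hr
    rcases Nat.eq_zero_or_pos r with rfl | hrpos
    · simpa [pc_zero] using pc_pow (k + 1)
    · have hne : 2 ^ (k + 1) + r ≠ 0 := by positivity
      rw [pc_succ hne]
      have hdiv : (2 ^ (k + 1) + r) / 2 = 2 ^ k + r / 2 := by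
        rw [pow_succ]; omega
      have hmod : (2 ^ (k + 1) + r) % 2 = r % 2 := by
        rw [pow_succ]; omega
      rw [hdiv, hmod, ih (r / 2) (by rw [pow_succ] at hr; omega),
        pc_succ (show r ≠ 0 by omega)]
      ring

lemma clog_succ_of_ne {m : Nat} (h2 : m ≠ 2 ^ Nat.clog 2 m) :
    Nat.clog 2 (m + 1) = Nat.clog 2 m := by
  apply le_antisymm
  · exact (Nat.clog_le_iff_le_pow one_lt_two).mpr
      (by have := Nat.le_pow_clog one_lt_two m; omega)
  · exact Nat.clog_mono_right 2 (by omega)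

lemma clog_succ_of_eq {m : Nat} (h2 : m = 2 ^ Nat.clog 2 m) (h1 : 1 ≤ m) :
    Nat.clog 2 (m + 1) = Nat.clog 2 m + 1 := by
  apply le_antisymm
  · apply (Nat.clog_le_iff_le_pow one_lt_two).mpr
    rw [pow_succ]
    have hp : 1 ≤ 2 ^ Nat.clog 2 m := Nat.one_le_two_pow
    omega
  · by_contra hlt
    have hle : Nat.clog 2 (m + 1) ≤ Nat.clog 2 m := by omega
    have := (Nat.clog_le_iff_le_pow one_lt_two).mp hle
    omega

-- value stored in A's locations array at index j
def locF (j : Nat) : Int := if j = 2 ^ Nat.clog 2 j then 1 else 0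

-- first loop of A: locations and the final powerOfTwo
lemma loopA1 (m : Nat) :
    (PySem.List.pyRange 0 ((m : Int) + 1) 1).foldl
      (fun (st : List Int × Int) i =>
        if i = st.2 then (st.1 ++ [1], st.2 * 2) else (st.1 ++ [0], st.2))
      ([], 1)
    = ((List.range (m + 1)).map locF, ((2 ^ Nat.clog 2 (m + 1) : Nat) : Int)) := by
  induction m with
  | zero =>
    rw [show ((0 : Nat) : Int) + 1 = 0 + 1 by norm_num, PySem.List.pyRange_one_singleton]
    simp [locF, Nat.clog_one_right]
  | succ m ih =>
    have hsplit : PySem.List.pyRange 0 (((m + 1 : Nat) : Int) + 1) 1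
        = PySem.List.pyRange 0 ((m : Int) + 1) 1 ++ [((m + 1 : Nat) : Int)] := by
      push_cast
      exact PySem.List.pyRange_one_succ_right (by omega)
    rw [hsplit, List.foldl_append, ih]
    simp only [List.foldl_cons, List.foldl_nil]
    have hr : (List.range (m + 1 + 1)).map locF
        = (List.range (m + 1)).map locF ++ [locF (m + 1)] := by
      rw [List.range_succ, List.map_append]; rfl
    rw [hr]
    by_cases hp : m + 1 = 2 ^ Nat.clog 2 (m + 1)
    · rw [if_pos (by exact_mod_cast hp), clog_succ_of_eq hp (by omega)]
      congr 1
      simp only [locF, if_pos hp]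
    · rw [if_neg (by exact_mod_cast hp), clog_succ_of_ne hp]
      congr 1
      simp only [locF, if_neg hp]

-- second loop of A: result = popcounts, lookBack = 2 ^ clog 2 (m+1)
lemma loopA2 (N : Nat) : ∀ m, m ≤ N →
    (PySem.List.pyRange 1 ((m : Int) + 1) 1).foldl
      (fun (st : List Int × Int) i =>
        if PySem.List.pyGetD ((List.range (N + 1)).map locF) i 0 = 1 then
          (st.1 ++ [1], st.2 * 2)
        else
          (st.1 ++ [PySem.List.pyGetD st.1 (i - st.2) 0 + 1], st.2))
      ([0], 1)
    = ((List.range (m + 1)).map (fun j => pc j), ((2 ^ Nat.clog 2 (m + 1) : Nat) : Int)) := by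
  intro m
  induction m with
  | zero =>
    intro _
    rw [show ((0 : Nat) : Int) + 1 = 1 by norm_num, PySem.List.pyRange_one_eq_nil le_rfl]
    simp [pc_zero, Nat.clog_one_right]
  | succ m ih =>
    intro hle
    have hsplit : PySem.List.pyRange 1 (((m + 1 : Nat) : Int) + 1) 1
        = PySem.List.pyRange 1 ((m : Int) + 1) 1 ++ [((m + 1 : Nat) : Int)] := by
      push_cast
      exact PySem.List.pyRange_one_succ_right (by omega)
    rw [hsplit, List.foldl_append, ih (by omega)]
    simp only [List.foldl_cons, List.foldl_nil]
    have hr : (List.range (m + 1 + 1)).map (fun j => pc j)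
        = (List.range (m + 1)).map (fun j => pc j) ++ [pc (m + 1)] := by
      rw [List.range_succ, List.map_append]; rfl
    have hlook : PySem.List.pyGetD ((List.range (N + 1)).map locF) ((m + 1 : Nat) : Int) 0
        = locF (m + 1) := by
      rw [PySem.List.pyGetD_natCast, List.getD_eq_getElem _ _ (by simp; omega),
        List.getElem_map, List.getElem_range]
    rw [hlook]
    by_cases hp : m + 1 = 2 ^ Nat.clog 2 (m + 1)
    · have hp1 : pc (m + 1) = 1 := by
        conv_lhs => rw [hp]
        exact pc_pow _
      rw [locF, if_pos hp, if_pos rfl, hr, clog_succ_of_eq hp (by omega), hp1]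
      congr 1
    · rw [locF, if_neg hp, if_neg (by norm_num), hr, clog_succ_of_ne hp]
      have hub : m + 1 < 2 ^ Nat.clog 2 (m + 1) := by
        have h := Nat.le_pow_clog one_lt_two (m + 1); omega
      have hm2 : 2 ≤ m + 1 := by
        rcases Nat.eq_zero_or_pos m with rfl | h
        · exact absurd (by simp [Nat.clog_one_right]) hp
        · omega
      have hlb : 2 ^ (Nat.clog 2 (m + 1) - 1) < m + 1 :=
        Nat.pow_pred_clog_lt_self one_lt_two (by omega)
      have hc1 : 1 ≤ Nat.clog 2 (m + 1) := by
        by_contra h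
        have h0 : Nat.clog 2 (m + 1) = 0 := by omega
        rw [h0, pow_zero] at hub; omega
      have hck : 2 ^ Nat.clog 2 (m + 1) = 2 * 2 ^ (Nat.clog 2 (m + 1) - 1) := by
        conv_lhs => rw [show Nat.clog 2 (m + 1) = (Nat.clog 2 (m + 1) - 1) + 1 by omega]
        rw [pow_succ]; ring
      -- the negative index (m+1) - 2^c wraps to 2*(m+1) - 2^c = 2*((m+1) - 2^(c-1))
      have hidx : ((m + 1 : Nat) : Int) - ((2 ^ Nat.clog 2 (m + 1) : Nat) : Int)
          = -(((2 ^ Nat.clog 2 (m + 1) - (m + 1) : Nat) : Int)) := by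
        rw [Nat.cast_sub hub.le]; ring
      have hget : PySem.List.pyGetD ((List.range (m + 1)).map (fun j => pc j))
          (((m + 1 : Nat) : Int) - ((2 ^ Nat.clog 2 (m + 1) : Nat) : Int)) 0
          = pc ((m + 1) - 2 ^ (Nat.clog 2 (m + 1) - 1)) := by
        rw [hidx, PySem.List.pyGetD_neg_natCast _ _ _ (by omega)
          (by simp only [List.length_map, List.length_range]; omega)]
        have hj : ((List.range (m + 1)).map fun j => pc j).length
            - (2 ^ Nat.clog 2 (m + 1) - (m + 1))
            = 2 * ((m + 1) - 2 ^ (Nat.clog 2 (m + 1) - 1)) := by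
          simp only [List.length_map, List.length_range]; omega
        rw [List.getElem_map, List.getElem_range, hj, pc_two_mul]
      rw [hget]
      have hpc : pc ((m + 1) - 2 ^ (Nat.clog 2 (m + 1) - 1)) + 1 = pc (m + 1) := by
        have h := pc_add_pow (Nat.clog 2 (m + 1) - 1)
          ((m + 1) - 2 ^ (Nat.clog 2 (m + 1) - 1)) (by omega)
        have he : 2 ^ (Nat.clog 2 (m + 1) - 1)
            + ((m + 1) - 2 ^ (Nat.clog 2 (m + 1) - 1)) = m + 1 := by omega
        rw [he] at h; omega
      rw [hpc]

-- B's loop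
lemma loopB (m : Nat) :
    (PySem.List.pyRange 1 ((m : Int) + 1) 1).foldl
      (fun r i =>
        r ++ [PySem.List.pyGetD r (PySem.Int.floordiv i 2) 0 + PySem.Int.mod i 2])
      [0]
    = (List.range (m + 1)).map (fun j => pc j) := by
  induction m with
  | zero =>
    rw [show ((0 : Nat) : Int) + 1 = 1 by norm_num, PySem.List.pyRange_one_eq_nil le_rfl]
    simp [pc_zero]
  | succ m ih =>
    have hsplit : PySem.List.pyRange 1 (((m + 1 : Nat) : Int) + 1) 1
        = PySem.List.pyRange 1 ((m : Int) + 1) 1 ++ [((m + 1 : Nat) : Int)] := by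
      push_cast
      exact PySem.List.pyRange_one_succ_right (by omega)
    rw [hsplit, List.foldl_append, ih]
    simp only [List.foldl_cons, List.foldl_nil]
    have hr : (List.range (m + 1 + 1)).map (fun j => pc j)
        = (List.range (m + 1)).map (fun j => pc j) ++ [pc (m + 1)] := by
      rw [List.range_succ, List.map_append]; rfl
    have hdiv : PySem.Int.floordiv ((m + 1 : Nat) : Int) 2 = (((m + 1) / 2 : Nat) : Int) := by
      exact_mod_cast PySem.Int.floordiv_natCast (m + 1) 2
    have hmod : PySem.Int.mod ((m + 1 : Nat) : Int) 2 = (((m + 1) % 2 : Nat) : Int) := by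
      exact_mod_cast PySem.Int.mod_natCast (m + 1) 2
    rw [hdiv, hmod, PySem.List.pyGetD_natCast, List.getD_eq_getElem _ _ (by simp; omega),
      List.getElem_map, List.getElem_range, hr]
    have hs : pc (m + 1) = pc ((m + 1) / 2) + (((m + 1) % 2 : Nat) : Int) :=
      pc_succ (by omega)
    rw [hs]

-- ===== VERDICT (by name: the statement is the Claim_ definition above) =====
theorem countBitsOptimized_spec : Claim_equal_countBitsOptimized := by
  intro n _
  unfold Spec_countBitsOptimized countBitsOptimized countBitsOptimized_alt
  rcases le_or_gt 0 n with hn | hn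
  · obtain ⟨N, rfl⟩ : ∃ N : Nat, n = (N : Int) := ⟨n.toNat, by omega⟩
    rw [loopA1 N]
    show (List.foldl
        (fun (st : List Int × Int) i =>
          if PySem.List.pyGetD ((List.range (N + 1)).map locF) i 0 = 1 then
            (st.1 ++ [1], st.2 * 2)
          else
            (st.1 ++ [PySem.List.pyGetD st.1 (i - st.2) 0 + 1], st.2))
        ([0], 1) (PySem.List.pyRange 1 ((N : Int) + 1) 1)).1
      = _
    rw [loopA2 N N le_rfl, loopB N]
  · rw [PySem.List.pyRange_one_eq_nil (by omega), PySem.List.pyRange_one_eq_nil (by omega)]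
    rfl
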